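-- pv_equiv track=rewrite | github.com/someone-stole-my-name/sublime-ansible-vault | lib/text.py | yaml_padding_from_line
-- ===== SOURCE A (Python) =====
-- def yaml_padding_from_line(line: str) -> int:
--     """Calculate number of spaces required to create a YAML multiline string.
--
--     eg:
--         line='foo: bar' -> 2
--         line='  foo: bar' -> 4
--     """
--     last_c = None
--     padding = 0
--     for i, c in enumerate(line):
--         if i == 0 and c != ' ':
--             padding = 2
--             break
--         if last_c == ' ' and c != ' ':
--             padding = i + 2
--             break
--         last_c = c
--         padding = i
--     return padding
-- ===== SOURCE B (Python) =====
-- def yaml_padding_from_line(line: str) -> int: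
--     """Calculate number of spaces required to create a YAML multiline string.
--
--     Closed form: the continuation indent is the leading-space count plus 2.
--     """
--     return len(line) - len(line.lstrip(' ')) + 2
-- ===== Notes on version B (the rewrite author's own statement) =====
-- stated objective: simpler
-- what changed: Replaces the element-by-element enumerate loop with break/last_c state by a single closed-form computation: leading-space count (via lstrip) plus 2.
-- intended difference: On lines made only of spaces (including the empty line) A returns leftover loop state len(line)-1 (0 for empty) instead of an indent, while B returns the uniform leading+2 = len(line)+2, the intended continuation indent rule applied consistently. — e.g. on yaml_padding_from_line(" "): A returns 0, B returns 3
import Mathlib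
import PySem

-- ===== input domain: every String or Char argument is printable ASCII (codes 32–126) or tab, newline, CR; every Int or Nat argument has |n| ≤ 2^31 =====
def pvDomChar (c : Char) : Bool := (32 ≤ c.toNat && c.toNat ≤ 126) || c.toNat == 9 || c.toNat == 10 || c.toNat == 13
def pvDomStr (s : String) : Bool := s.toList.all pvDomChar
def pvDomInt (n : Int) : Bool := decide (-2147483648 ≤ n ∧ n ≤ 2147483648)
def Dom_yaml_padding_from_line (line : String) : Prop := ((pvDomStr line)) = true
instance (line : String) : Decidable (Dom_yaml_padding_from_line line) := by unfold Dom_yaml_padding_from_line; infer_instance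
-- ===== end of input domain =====

-- B replaces A's enumerate loop (break/last_c state) by the closed form "leading spaces + 2";
-- on all-space lines (incl. empty) A returns leftover loop state, B the uniform indent (see D_).


-- ===== PORT A =====
-- the 'for i, c in enumerate(line)' loop with state (last_c, padding) and two break branches
def yamlLoopA : List Char → Nat → Option Char → Int → Int
  | [], _, _, p => p
  | c :: rest, i, last_c, _padding =>
    if i = 0 ∧ c ≠ ' ' then 2
    else if last_c = some ' ' ∧ c ≠ ' ' then (i : Int) + 2
    else yamlLoopA rest (i + 1) (some c) (i : Int)

def yaml_padding_from_line (line : String) : Int :=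
  yamlLoopA line.toList 0 none 0

-- ===== PORT B =====
-- len(line) - len(line.lstrip(' ')) + 2; lstrip(' ') ported by hand as dropWhile (= ' '), exact
def yaml_padding_from_line_alt (line : String) : Int :=
  (line.toList.length : Int) - ((line.toList.dropWhile (fun c => c = ' ')).length : Int) + 2

-- ===== PRECONDITION & SPEC =====
-- On lines made only of spaces (including the empty line) A returns leftover loop state
-- len(line)-1 (0 for empty) instead of an indent, while B returns the uniform leading+2 =
-- len(line)+2, the intended continuation indent rule applied consistently.
def D_yaml_padding_from_line (line : String) : Prop := ∀ c ∈ line.toList, c = ' '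
instance (line : String) : Decidable (D_yaml_padding_from_line line) := by unfold D_yaml_padding_from_line; infer_instance

def Spec_yaml_padding_from_line (line : String) (out : Int) : Prop := ¬ D_yaml_padding_from_line line → out = yaml_padding_from_line_alt line
instance (line : String) (out : Int) : Decidable (Spec_yaml_padding_from_line line out) := by unfold Spec_yaml_padding_from_line; infer_instance

def pvDiffWitness_yaml_padding_from_line : String := " "
def pvDiffWitnessOut_yaml_padding_from_line : Int × Int := (0, 3)

-- ===== CLAIM (what is proved, stated in full; the proofs are below) =====
def Claim_unchanged_yaml_padding_from_line : Prop := ∀ (line : String), Dom_yaml_padding_from_line line → Spec_yaml_padding_from_line line (yaml_padding_from_line line)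
def Claim_changed_yaml_padding_from_line : Prop := Dom_yaml_padding_from_line (pvDiffWitness_yaml_padding_from_line) ∧ D_yaml_padding_from_line (pvDiffWitness_yaml_padding_from_line) ∧ yaml_padding_from_line (pvDiffWitness_yaml_padding_from_line) = pvDiffWitnessOut_yaml_padding_from_line.1 ∧ yaml_padding_from_line_alt (pvDiffWitness_yaml_padding_from_line) = pvDiffWitnessOut_yaml_padding_from_line.2 ∧ pvDiffWitnessOut_yaml_padding_from_line.1 ≠ pvDiffWitnessOut_yaml_padding_from_line.2
def Claim_exact_yaml_padding_from_line : Prop := ∀ (line : String), Dom_yaml_padding_from_line line → D_yaml_padding_from_line line → yaml_padding_from_line line ≠ yaml_padding_from_line_alt line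

-- ===== LEMMAS AND PROOFS =====

-- After a space has been seen (i ≥ 1), the loop on a suffix containing a non-space
-- returns i + (number of further leading spaces) + 2.
theorem yamlLoopA_after_space (l : List Char) : ∀ (i : Nat) (p : Int), i ≠ 0 →
    (∃ c ∈ l, c ≠ ' ') →
    yamlLoopA l i (some ' ') p = ((i : Int) + ((l.takeWhile (fun c => c = ' ')).length : Int)) + 2 := by
  induction l with
  | nil => intro i p _ h; rcases h with ⟨c, hc, _⟩; simp at hc
  | cons c rest ih =>
    intro i p hi h
    by_cases hc : c = ' '
    · subst hc
      have hrest : ∃ d ∈ rest, d ≠ ' ' := by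
        rcases h with ⟨d, hd, hne⟩
        rcases List.mem_cons.mp hd with h1 | h2
        · exact absurd h1 hne
        · exact ⟨d, h2, hne⟩
      rw [yamlLoopA]
      simp only [hi, if_false, ne_eq, not_true_eq_false, and_false]
      rw [ih (i + 1) (i : Int) (Nat.succ_ne_zero i) hrest]
      simp [List.takeWhile]
      ring
    · rw [yamlLoopA]
      simp only [hi, false_and, if_false]
      simp [hc, List.takeWhile]

-- On a nonempty all-space suffix (i ≥ 1) the loop runs off the end with leftover state.
theorem yamlLoopA_all_space (l : List Char) : ∀ (i : Nat) (p : Int),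
    (∀ c ∈ l, c = ' ') → l ≠ [] →
    yamlLoopA l i (some ' ') p = (i : Int) + (l.length : Int) - 1 := by
  induction l with
  | nil => intro _ _ _ h; exact absurd rfl h
  | cons c rest ih =>
    intro i p hall _
    have hc : c = ' ' := hall c (List.mem_cons_self ..)
    subst hc
    rw [yamlLoopA]
    simp only [ne_eq, not_true_eq_false, and_false, if_false]
    by_cases hr : rest = []
    · subst hr; simp [yamlLoopA]
    · rw [ih (i + 1) (i : Int) (fun d hd => hall d (List.mem_cons_of_mem _ hd)) hr]
      simp; ring

theorem alt_eq_takeWhile (line : String) :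
    yaml_padding_from_line_alt line = ((line.toList.takeWhile (fun c => c = ' ')).length : Int) + 2 := by
  unfold yaml_padding_from_line_alt
  have h := List.takeWhile_append_dropWhile (p := fun c => c = ' ') (l := line.toList)
  have hlen : line.toList.length =
      (line.toList.takeWhile (fun c => c = ' ')).length + (line.toList.dropWhile (fun c => c = ' ')).length := by
    conv_lhs => rw [← h]
    exact List.length_append
  rw [hlen]; push_cast; ring

-- ===== VERDICT (by name: the statement is the Claim_ definition above) =====
theorem yaml_padding_from_line_spec : Claim_unchanged_yaml_padding_from_line := by
  intro line _ hD
  unfold D_yaml_padding_from_line at hD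
  simp only [not_forall] at hD
  rcases hD with ⟨d, hd, hdne⟩
  rw [alt_eq_takeWhile]
  unfold yaml_padding_from_line
  rcases hl : line.toList with _ | ⟨c, rest⟩
  · rw [hl] at hd; simp at hd
  · rw [hl] at hd
    by_cases hc : c = ' '
    · subst hc
      rw [yamlLoopA]
      simp only [ne_eq, not_true_eq_false, and_false, if_false]
      have hrest : ∃ e ∈ rest, e ≠ ' ' := by
        rcases List.mem_cons.mp hd with h1 | h2
        · exact absurd h1 hdne
        · exact ⟨d, h2, hdne⟩
      rw [show (0+1)=1 from rfl, show ((0:Nat):Int)=0 from rfl,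
         yamlLoopA_after_space rest 1 0 one_ne_zero hrest]
      simp [List.takeWhile]
      ring
    · rw [yamlLoopA]
      simp [hc, List.takeWhile]

theorem yaml_padding_from_line_changed : Claim_changed_yaml_padding_from_line := by
  unfold Claim_changed_yaml_padding_from_line
  refine ⟨by decide, ?_, by decide, by decide, by decide⟩
  unfold D_yaml_padding_from_line pvDiffWitness_yaml_padding_from_line
  simp

theorem yaml_padding_from_line_tight : Claim_exact_yaml_padding_from_line := by
  intro line _ hD
  rw [alt_eq_takeWhile]
  have htw : line.toList.takeWhile (fun c => c = ' ') = line.toList := by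
    apply List.takeWhile_eq_self_iff.mpr
    intro c hc; simp [hD c hc]
  rw [htw]
  unfold yaml_padding_from_line
  rcases hl : line.toList with _ | ⟨c, rest⟩
  · simp [yamlLoopA]
  · have hc : c = ' ' := hD c (by rw [hl]; exact List.mem_cons_self ..)
    subst hc
    rw [yamlLoopA]
    simp only [ne_eq, not_true_eq_false, and_false, if_false]
    by_cases hr : rest = []
    · subst hr; simp [yamlLoopA]
    · rw [show (0+1)=1 from rfl, show ((0:Nat):Int)=0 from rfl,
         yamlLoopA_all_space rest 1 0 (fun e he => hD e (by rw [hl]; exact List.mem_cons_of_mem _ he)) hr]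
      simp; omega
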